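-- pv_equiv track=rewrite | github.com/tqmsh/LC | Tree/BT/P1827 [USACO3.4] 美国血统 American Heritage.py | find_postorder
-- ===== SOURCE A (Python) =====
-- def find_postorder(inorder, preorder):
--     idx = {val: idx for idx, val in enumerate(inorder)}
--     def dfs(in_left, in_right, pre_left, pre_right):
--         # inorder: 左根右
--         # preorder: 根左右
--
--         if in_left > in_right or pre_left > pre_right: return ""
--
--         # Root value from preorder
--         root_val = preorder[pre_left]
--         root_idx = idx[root_val]
--
--         # Left and right subtree sizes
--         left_tree_size = root_idx - in_left # [in_L, rt)
--
--         # Recursive traversal for left and right subtrees and then the root (postorder)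
--         left_part = dfs(in_left, root_idx - 1, pre_left + 1, pre_left + left_tree_size)
--         right_part = dfs(root_idx + 1, in_right, pre_left + left_tree_size + 1, pre_right)
--         return left_part + right_part + root_val
--
--     # Initial call
--     return dfs(0, len(inorder) - 1, 0, len(preorder) - 1)
-- ===== SOURCE B (Python) =====
-- def find_postorder(inorder, preorder):
--     # Divide-and-conquer on the strings themselves: no index dict, no interval
--     # bookkeeping -- split inorder at the preorder root and recurse on slices.
--     if not inorder or not preorder:
--         return ""
--     root = preorder[0]
--     i = inorder.index(root)
--     return (find_postorder(inorder[:i], preorder[1:i + 1])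
--             + find_postorder(inorder[i + 1:], preorder[i + 1:])
--             + root)
-- ===== Notes on version B (the rewrite author's own statement) =====
-- stated objective: simpler
-- what changed: B drops A's {val:index} dict and four-index interval recursion entirely: it recurses directly on string slices, splitting inorder at the first occurrence of the preorder root with str.index and recursing on the slice pairs.
-- outside the precondition, e.g. on find_postorder('ab', 'a'): A returns 'a', B returns 'a'; on find_postorder('b', 'ba'): A returns 'b', B returns 'b'; on find_postorder('abc', 'bca'): A raises IndexError, B raises ValueError
import Mathlib
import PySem

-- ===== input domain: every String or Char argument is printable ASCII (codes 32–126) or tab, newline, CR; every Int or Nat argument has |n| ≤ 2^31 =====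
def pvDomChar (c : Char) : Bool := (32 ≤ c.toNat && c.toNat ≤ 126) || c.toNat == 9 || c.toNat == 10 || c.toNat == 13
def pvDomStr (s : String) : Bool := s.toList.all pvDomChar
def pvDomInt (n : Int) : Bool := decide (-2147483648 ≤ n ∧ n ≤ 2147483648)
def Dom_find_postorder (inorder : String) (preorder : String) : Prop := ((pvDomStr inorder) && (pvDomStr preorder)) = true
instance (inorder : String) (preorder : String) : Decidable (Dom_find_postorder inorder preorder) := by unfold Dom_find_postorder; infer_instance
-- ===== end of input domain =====

-- B drops A's {val:index} dict and four-index interval recursion and recurses directly on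
-- string slices, splitting inorder at the preorder root; objective: simpler, same cost.

-- ===== PORT A =====
-- idx = {val: idx for idx, val in enumerate(inorder)}
def pvMkIdx (s : List Char) : PySem.Dict Char Int :=
  (PySem.List.enumerate s 0).foldl (fun d p => d.insert p.2 p.1) PySem.Dict.empty

-- dfs(in_left, in_right, pre_left, pre_right); fuel only makes the recursion structural
-- (inside Pre_ the recursion depth is < fuel = len(preorder)+1, so fuel never runs out);
-- preorder[pre_left] / idx[root_val] use total defaults, never reached inside Pre_.
def pvDfsA (idx : PySem.Dict Char Int) (pre : List Char) :
    Nat → Int → Int → Int → Int → List Char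
  | 0, _, _, _, _ => []
  | fuel + 1, inL, inR, preL, preR =>
    if inL > inR ∨ preL > preR then []
    else
      let rootVal := PySem.List.pyGetD pre preL ' '
      let rootIdx := idx.getD rootVal 0
      let lts := rootIdx - inL
      let leftPart := pvDfsA idx pre fuel inL (rootIdx - 1) (preL + 1) (preL + lts)
      let rightPart := pvDfsA idx pre fuel (rootIdx + 1) inR (preL + lts + 1) preR
      leftPart ++ rightPart ++ [rootVal]

def find_postorder (inorder : String) (preorder : String) : String :=
  let ino := inorder.toList
  let pre := preorder.toList
  String.ofList (pvDfsA (pvMkIdx ino) pre (pre.length + 1) 0 ((ino.length : Int) - 1) 0 ((pre.length : Int) - 1))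

-- ===== PORT B =====
-- if not inorder or not preorder: return ""; root = preorder[0]; i = inorder.index(root);
-- recurse on the slices inorder[:i]/preorder[1:i+1] and inorder[i+1:]/preorder[i+1:].
-- inorder.index raises ValueError when root is absent (outside Pre_); the .getD 0 there is unreached inside Pre_.
def pvPostSlice : List Char → List Char → List Char
  | [], _ => []
  | _ :: _, [] => []
  | x :: tl, root :: rest =>
    let i : Nat := (PySem.List.index? (x :: tl) root).getD 0
    pvPostSlice ((x :: tl).take i) (rest.take i) ++
      pvPostSlice ((x :: tl).drop (i + 1)) (rest.drop i) ++ [root]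
termination_by _ pre => pre.length
decreasing_by
  all_goals (simp [List.length_take]; try omega)

def find_postorder_alt (inorder : String) (preorder : String) : String :=
  String.ofList (pvPostSlice inorder.toList preorder.toList)

-- ===== PRECONDITION & SPEC =====
-- Pre_ admits the empty-string cases (A returns "" at once) and the closed-form description of a
-- consistent traversal pair of a duplicate-free tree: inorder duplicate-free, preorder a
-- permutation of it, and the preorder's inorder-positions avoid the 231 pattern (no indices
-- i < j < k whose positions satisfy pos k < pos i < pos j) — the classic characterisation of
-- valid preorders.  It excludes the remaining inputs because on those inconsistent pairs A's
-- recursion raises IndexError/KeyError on some and returns an accidental partial concatenation on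
-- others, with no closed-form separation between the two; B likewise either raises (ValueError from
-- str.index) or returns its own partial concatenation there.
def Pre_find_postorder (inorder : String) (preorder : String) : Prop :=
  inorder = "" ∨ preorder = "" ∨
    (inorder.toList.Nodup ∧ preorder.toList.Perm inorder.toList ∧
      ∀ k, k < preorder.toList.length → ∀ j, j < k → ∀ i, i < j →
        ¬ (inorder.toList.idxOf (preorder.toList.getD k ' ') < inorder.toList.idxOf (preorder.toList.getD i ' ') ∧
           inorder.toList.idxOf (preorder.toList.getD i ' ') < inorder.toList.idxOf (preorder.toList.getD j ' ')))
instance (inorder : String) (preorder : String) : Decidable (Pre_find_postorder inorder preorder) := by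
  unfold Pre_find_postorder; infer_instance

def pvWitness_find_postorder : String × String := ("abc", "bac")

def Spec_find_postorder (inorder : String) (preorder : String) (out : String) : Prop := out = find_postorder_alt inorder preorder
instance (inorder : String) (preorder : String) (out : String) : Decidable (Spec_find_postorder inorder preorder out) := by unfold Spec_find_postorder; infer_instance

-- ===== CLAIM (what is proved, stated in full; the proofs are below) =====
def Claim_equal_find_postorder : Prop := ∀ (inorder : String) (preorder : String), Dom_find_postorder inorder preorder → Pre_find_postorder inorder preorder → Spec_find_postorder inorder preorder (find_postorder inorder preorder)

-- ===== LEMMAS AND PROOFS =====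

-- proof-side validity checker: the recursive splitting that both programs perform
-- (fuel = pre.length bounds the recursion depth and makes it structural)
def pvValidPairGo : Nat → List Char → List Char → Bool
  | _, ino, [] => ino.isEmpty
  | 0, _, _ :: _ => false
  | fuel + 1, ino, r :: rest =>
    if r ∈ ino then
      let i := ino.idxOf r
      pvValidPairGo fuel (ino.take i) (rest.take i) && pvValidPairGo fuel (ino.drop (i + 1)) (rest.drop i)
    else false

def pvValidPair (ino pre : List Char) : Bool := pvValidPairGo pre.length ino pre

-- the 231-avoidance condition of Pre_, as a named predicate for the proofs
def pvNo231 (li lp : List Char) : Prop :=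
  ∀ k, k < lp.length → ∀ j, j < k → ∀ i, i < j →
    ¬ (li.idxOf (lp.getD k ' ') < li.idxOf (lp.getD i ' ') ∧
       li.idxOf (lp.getD i ' ') < li.idxOf (lp.getD j ' '))

-- A's dict is first-occurrence index lookup once inorder is duplicate-free
theorem pvMkIdx_foldl_getD (l : List Char) :
    ∀ (d : PySem.Dict Char Int) (s : Int) (c : Char), l.Nodup →
      (((PySem.List.enumerate l s).foldl (fun d p => d.insert p.2 p.1) d).getD c 0) =
        if c ∈ l then s + (l.idxOf c : Int) else d.getD c 0 := by
  induction l with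
  | nil => intro d s c _; simp [PySem.List.enumerate_nil]
  | cons x xs ih =>
    intro d s c hnd
    rw [PySem.List.enumerate_cons]
    simp only [List.foldl_cons]
    rw [ih (d.insert x s) (s + 1) c hnd.of_cons]
    by_cases hcx : c = x
    · subst hcx
      have hcn : c ∉ xs := (List.nodup_cons.mp hnd).1
      simp [hcn, PySem.Dict.getD_insert_self, List.idxOf_cons_self]
    · by_cases hm : c ∈ xs
      · simp [hm, hcx, List.idxOf_cons_ne _ (Ne.symm hcx)]
        ring
      · rw [PySem.Dict.getD_insert_of_ne d _ _ hcx]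
        simp [hm, hcx]

theorem pvMkIdx_getD (ino : List Char) (c : Char) (hnd : ino.Nodup) (h : c ∈ ino) :
    (pvMkIdx ino).getD c 0 = (ino.idxOf c : Int) := by
  rw [pvMkIdx, pvMkIdx_foldl_getD ino PySem.Dict.empty 0 c hnd]
  simp [h]

-- the fuel of pvValidPairGo is irrelevant as long as it dominates pre.length
theorem pvValidPairGo_congr : ∀ (f1 f2 : Nat) (ino pre : List Char),
    pre.length ≤ f1 → pre.length ≤ f2 → pvValidPairGo f1 ino pre = pvValidPairGo f2 ino pre := by
  intro f1
  induction f1 with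
  | zero =>
    intro f2 ino pre h1 _
    cases pre with
    | nil => cases f2 <;> rfl
    | cons r rest => simp at h1
  | succ n ih =>
    intro f2 ino pre h1 h2
    cases pre with
    | nil => cases f2 <;> rfl
    | cons r rest =>
      cases f2 with
      | zero => simp at h2
      | succ m =>
        simp only [pvValidPairGo]
        by_cases hmem : r ∈ ino
        · simp only [if_pos hmem]
          have t1 : (rest.take (ino.idxOf r)).length ≤ n := by
            simp only [List.length_cons] at h1; simp [List.length_take]; omega
          have t2 : (rest.drop (ino.idxOf r)).length ≤ n := by
            simp only [List.length_cons] at h1; simp [List.length_drop]; omega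
          have t3 : (rest.take (ino.idxOf r)).length ≤ m := by
            simp only [List.length_cons] at h2; simp [List.length_take]; omega
          have t4 : (rest.drop (ino.idxOf r)).length ≤ m := by
            simp only [List.length_cons] at h2; simp [List.length_drop]; omega
          rw [ih m _ _ t1 t3, ih m _ _ t2 t4]
        · simp only [if_neg hmem]

theorem pvValidPair_cons (ino : List Char) (r : Char) (rest : List Char) :
    pvValidPair ino (r :: rest) =
      (if r ∈ ino then
        pvValidPair (ino.take (ino.idxOf r)) (rest.take (ino.idxOf r)) &&
          pvValidPair (ino.drop (ino.idxOf r + 1)) (rest.drop (ino.idxOf r))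
      else false) := by
  unfold pvValidPair
  simp only [List.length_cons, pvValidPairGo]
  by_cases hmem : r ∈ ino
  · simp only [if_pos hmem]
    rw [pvValidPairGo_congr rest.length (rest.take (ino.idxOf r)).length _ _
      (by simp [List.length_take]) (by omega)]
    rw [pvValidPairGo_congr rest.length (rest.drop (ino.idxOf r)).length _ _
      (by simp [List.length_drop]) (by omega)]
  · simp only [if_neg hmem]

-- a consistent traversal pair has equal lengths
theorem pvValidPairGo_length : ∀ (f : Nat) (ino pre : List Char), pvValidPairGo f ino pre = true →
    ino.length = pre.length := by
  intro f
  induction f with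
  | zero =>
    intro ino pre h
    cases pre with
    | nil => simp [pvValidPairGo] at h; simp [h]
    | cons r rest => simp [pvValidPairGo] at h
  | succ n ih =>
    intro ino pre h
    cases pre with
    | nil => simp [pvValidPairGo] at h; simp [h]
    | cons r rest =>
      simp only [pvValidPairGo] at h
      by_cases hmem : r ∈ ino
      · rw [if_pos hmem] at h
        simp only [Bool.and_eq_true] at h
        have l1 := ih _ _ h.1
        have l2 := ih _ _ h.2
        have hi : ino.idxOf r < ino.length := List.idxOf_lt_length_of_mem hmem
        simp [List.length_take, List.length_drop] at l1 l2
        simp only [List.length_cons]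
        omega
      · rw [if_neg hmem] at h; exact absurd h (by simp)

theorem pvValidPair_length (ino pre : List Char) (h : pvValidPair ino pre = true) :
    ino.length = pre.length := pvValidPairGo_length _ _ _ h

-- B's `inorder.index(root)` value when root is present
theorem pvIndexGetD (l : List Char) (r : Char) (h : r ∈ l) :
    (PySem.List.index? l r).getD 0 = l.idxOf r := by
  rw [PySem.List.index?_eq_idxOf?]
  induction l with
  | nil => simp at h
  | cons x xs ih =>
    by_cases hx : x = r
    · subst hx; simp [List.idxOf?_cons]
    · have hm : r ∈ xs := by simpa [Ne.symm hx] using h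
      have := ih hm
      simp [List.idxOf?_cons, hx, beq_iff_eq]
      cases he : List.idxOf? r xs with
      | none => simp [he] at this; simp [List.idxOf?_eq_none_iff] at he; exact absurd hm he
      | some k => simp [he] at this ⊢; omega

-- the first occurrence inside a contiguous segment of a duplicate-free list, globally
theorem idxOf_segment (ino : List Char) (hnd : ino.Nodup) (a k : Nat) (hak : a + k ≤ ino.length)
    (r : Char) (hr : r ∈ (ino.drop a).take k) :
    ino.idxOf r = a + ((ino.drop a).take k).idxOf r := by
  set sub := (ino.drop a).take k with hsub
  have hi : sub.idxOf r < sub.length := List.idxOf_lt_length_of_mem hr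
  have hlen : sub.length ≤ k := by simp [hsub, List.length_take]
  have hlt : a + sub.idxOf r < ino.length := by
    have : sub.length ≤ ino.length - a := by simp [hsub, List.length_take, List.length_drop]
    omega
  have hget : ino[a + sub.idxOf r]'hlt = r := by
    have h1 : sub[sub.idxOf r]? = some r := by
      rw [List.getElem?_eq_getElem hi, List.getElem_idxOf]
    have h2 : ino[a + sub.idxOf r]? = some r := by
      rw [← List.getElem?_drop]
      rw [← h1, hsub]
      rw [List.getElem?_take_of_lt (by omega : sub.idxOf r < k)]
    rw [List.getElem?_eq_getElem hlt] at h2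
    exact Option.some_injective _ h2
  calc ino.idxOf r = ino.idxOf (ino[a + sub.idxOf r]'hlt) := by rw [hget]
    _ = a + sub.idxOf r := List.Nodup.idxOf_getElem hnd _ hlt

-- positions map: map idxOf = range
theorem pv_map_idxOf (li : List Char) (hnd : li.Nodup) : li.map (li.idxOf ·) = List.range li.length := by
  apply List.ext_getElem <;> simp [List.Nodup.idxOf_getElem hnd]

theorem pv_countP_range (n i : Nat) : (List.range n).countP (fun x => decide (x < i)) = min i n := by
  induction n with
  | zero => simp
  | succ m ih => rw [List.range_succ, List.countP_append]; simp [ih]; split_ifs <;> omega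

-- c ∈ li with idxOf below i lies in the prefix, etc.
theorem pv_mem_take_of_idxOf_lt (li : List Char) (c : Char) (hc : c ∈ li) (i : Nat)
    (h : li.idxOf c < i) : c ∈ li.take i := by
  have hlt : li.idxOf c < li.length := List.idxOf_lt_length_of_mem hc
  have : (li.take i)[li.idxOf c]'(by simp [List.length_take]; omega) = c := by
    rw [List.getElem_take, List.getElem_idxOf]
  exact this ▸ List.getElem_mem _
theorem pv_mem_drop_of_idxOf_gt (li : List Char) (c : Char) (hc : c ∈ li) (i : Nat)
    (h : i < li.idxOf c) : c ∈ li.drop (i+1) := by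
  have hlt : li.idxOf c < li.length := List.idxOf_lt_length_of_mem hc
  have : (li.drop (i+1))[li.idxOf c - (i+1)]'(by simp [List.length_drop]; omega) = c := by
    rw [List.getElem_drop]
    simp only [show i + 1 + (li.idxOf c - (i+1)) = li.idxOf c from by omega]
    exact List.getElem_idxOf hlt
  exact this ▸ List.getElem_mem _

theorem pv_idxOf_eq_iff (li : List Char) (_hnd : li.Nodup) (c r : Char) (hc : c ∈ li) (hr : r ∈ li)
    (h : li.idxOf c = li.idxOf r) : c = r := by
  have h1 := List.getElem_idxOf (List.idxOf_lt_length_of_mem hc)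
  have h2 := List.getElem_idxOf (List.idxOf_lt_length_of_mem hr)
  rw [← h1, ← h2]
  congr 1

-- THE BRIDGE
theorem pv_pre231_valid : ∀ (n : Nat) (li lp : List Char), lp.length ≤ n → li.Nodup →
    lp.Perm li → pvNo231 li lp → pvValidPairGo n li lp = true := by
  intro n
  induction n with
  | zero =>
    intro li lp hn _ hperm _
    have : lp = [] := List.length_eq_zero_iff.mp (by omega)
    subst this
    have : li = [] := (List.Perm.nil_eq hperm).symm
    subst this
    rfl
  | succ n ih =>
    intro li lp hn hnd hperm h231
    cases lp with
    | nil =>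
      have : li = [] := (List.Perm.nil_eq hperm).symm
      subst this; rfl
    | cons r rest =>
      have hr : r ∈ li := hperm.subset (List.mem_cons_self)
      have hlpnd : (r :: rest).Nodup := (hperm.nodup_iff).mpr hnd
      set i := li.idxOf r with hidef
      have hi : i < li.length := List.idxOf_lt_length_of_mem hr
      have hrest_sub : ∀ c ∈ rest, c ∈ li := fun c hc => hperm.subset (List.mem_cons_of_mem _ hc)
      have hrest_ne : ∀ c ∈ rest, c ≠ r := by
        intro c hc he; subst he
        exact (List.nodup_cons.mp hlpnd).1 hc
      have hrest_pos : ∀ c ∈ rest, li.idxOf c ≠ i := by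
        intro c hc he
        exact hrest_ne c hc (pv_idxOf_eq_iff li hnd c r (hrest_sub c hc) hr he)
      have hlen : li.length = rest.length + 1 := by
        have := hperm.length_eq; simpa using this.symm
      -- counting: rest has exactly i elements with position < i
      have hcnt : rest.countP (fun c => decide (li.idxOf c < i)) = i := by
        have hre : rest.Perm (li.erase r) :=
          List.Perm.cons_inv (hperm.trans (List.perm_cons_erase hr))
        have h1 : li.countP (fun c => decide (li.idxOf c < i)) = i := by
          have := pv_map_idxOf li hnd
          have h2 : (li.map (li.idxOf ·)).countP (fun x => decide (x < i)) =
              li.countP (fun c => decide (li.idxOf c < i)) := List.countP_map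
          rw [this, pv_countP_range] at h2
          omega
        have hpr : (decide (li.idxOf r < i)) = false := by simp [hidef]
        have h3 : li.countP (fun c => decide (li.idxOf c < i)) =
            (r :: li.erase r).countP (fun c => decide (li.idxOf c < i)) :=
          (List.perm_cons_erase hr).countP_eq _
        rw [List.countP_cons, hpr] at h3
        have h4 : li.countP (fun c => decide (li.idxOf c < i)) =
            (li.erase r).countP (fun c => decide (li.idxOf c < i)) := by rw [h3]; simp
        rw [List.Perm.countP_eq _ hre, ← h4]
        exact h1
      -- upward closure: once a position above i appears, nothing below i may follow
      have up : ∀ j k, j < k → k < rest.length → i < li.idxOf (rest.getD j ' ') →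
          i < li.idxOf (rest.getD k ' ') := by
        intro j k hjk hk hbig
        have hkmem : rest.getD k ' ' ∈ rest := by
          rw [List.getD_eq_getElem _ _ hk]; exact List.getElem_mem _
        rcases Nat.lt_or_ge i (li.idxOf (rest.getD k ' ')) with h | h
        · exact h
        · exfalso
          have hne := hrest_pos _ hkmem
          have hsm : li.idxOf (rest.getD k ' ') < i := by omega
          have := h231 (k+1) (by simp; omega) (j+1) (by omega) 0 (by omega)
          simp only [List.getD_cons_zero, List.getD_cons_succ] at this
          exact this ⟨hsm, hbig⟩
      -- smalls are exactly the first i slots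
      have small_iff : ∀ k, k < rest.length → (li.idxOf (rest.getD k ' ') < i ↔ k < i) := by
        intro k hk
        constructor
        · intro hsm
          by_contra hik
          push Not at hik
          -- all slots ≤ k are small (else up-closure would make slot k big)
          have hall : ∀ c ∈ rest.take (k+1), decide (li.idxOf c < i) = true := by
            intro c hc
            obtain ⟨l, hl, rfl⟩ := List.mem_iff_getElem.mp hc
            have hlk : l ≤ k := by simp [List.length_take] at hl; omega
            have hlr : l < rest.length := by simp [List.length_take] at hl; omega
            rw [List.getElem_take]
            simp only [decide_eq_true_eq]
            by_contra hbig
            push Not at hbig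
            have hne := hrest_pos (rest[l]) (List.getElem_mem _)
            have hbig' : i < li.idxOf rest[l] := by omega
            rcases Nat.lt_or_ge l k with hlt | hge
            · have := up l k hlt hk (by rwa [List.getD_eq_getElem _ _ hlr])
              omega
            · have : l = k := by omega
              subst this
              rw [List.getD_eq_getElem _ _ hlr] at hsm
              omega
          have : rest.countP (fun c => decide (li.idxOf c < i)) ≥ k + 1 := by
            rw [← List.take_append_drop (k+1) rest, List.countP_append]
            have : (rest.take (k+1)).countP (fun c => decide (li.idxOf c < i)) = (rest.take (k+1)).length :=
              List.countP_eq_length.mpr hall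
            rw [this]
            simp [List.length_take]
            omega
          omega
        · intro hki
          by_contra hbig
          push Not at hbig
          have hkm : rest.getD k ' ' ∈ rest := by rw [List.getD_eq_getElem _ _ hk]; exact List.getElem_mem _
          have hbig' : i < li.idxOf (rest.getD k ' ') := by
            have := hrest_pos _ hkm; omega
          -- all slots ≥ k are big
          have hzero : ∀ c ∈ rest.drop k, ¬ (decide (li.idxOf c < i) = true) := by
            intro c hc
            obtain ⟨l, hl, rfl⟩ := List.mem_iff_getElem.mp hc
            rw [List.getElem_drop]
            simp only [decide_eq_true_eq]
            have hkl : k + l < rest.length := by simp [List.length_drop] at hl; omega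
            rcases Nat.eq_or_lt_of_le (Nat.le_add_right k l) with he | hlt
            · have hl0 : l = 0 := by omega
              subst hl0
              simp only [Nat.add_zero]
              rw [List.getD_eq_getElem _ _ hk] at hbig'
              omega
            · have := up k (k+l) hlt hkl hbig'
              rw [List.getD_eq_getElem _ _ hkl] at this
              omega
          have : rest.countP (fun c => decide (li.idxOf c < i)) ≤ k := by
            rw [← List.take_append_drop k rest, List.countP_append]
            have hz : (rest.drop k).countP (fun c => decide (li.idxOf c < i)) = 0 :=
              List.countP_eq_zero.mpr hzero
            rw [hz]
            have : (rest.take k).countP (fun c => decide (li.idxOf c < i)) ≤ (rest.take k).length :=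
              List.countP_le_length
            simp [List.length_take] at this ⊢
            omega
          omega
      -- getD transfer lemmas
      have hilen : i ≤ rest.length := by omega
      have egetDL : ∀ l, l < (rest.take i).length → (rest.take i).getD l ' ' = rest.getD l ' ' := by
        intro l hl
        have hlr : l < rest.length := by simp [List.length_take] at hl; omega
        rw [List.getD_eq_getElem _ _ hl, List.getElem_take, List.getD_eq_getElem _ _ hlr]
      have egetDR : ∀ l, l < (rest.drop i).length → (rest.drop i).getD l ' ' = rest.getD (i + l) ' ' := by
        intro l hl
        have hlr : i + l < rest.length := by simp [List.length_drop] at hl; omega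
        rw [List.getD_eq_getElem _ _ hl, List.getElem_drop, List.getD_eq_getElem _ _ hlr]
      have memL : ∀ l, l < (rest.take i).length → (rest.take i).getD l ' ' ∈ li.take i := by
        intro l hl
        have hlr : l < rest.length := by simp [List.length_take] at hl; omega
        have hli : l < i := by simp [List.length_take] at hl; omega
        rw [egetDL l hl]
        have hmem : rest.getD l ' ' ∈ rest := by
          rw [List.getD_eq_getElem _ _ hlr]; exact List.getElem_mem _
        exact pv_mem_take_of_idxOf_lt li _ (hrest_sub _ hmem) i ((small_iff l hlr).mpr hli)
      have memR : ∀ l, l < (rest.drop i).length → (rest.drop i).getD l ' ' ∈ li.drop (i+1) := by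
        intro l hl
        have hlr : i + l < rest.length := by simp [List.length_drop] at hl; omega
        rw [egetDR l hl]
        have hmem : rest.getD (i+l) ' ' ∈ rest := by
          rw [List.getD_eq_getElem _ _ hlr]; exact List.getElem_mem _
        have hbig : ¬ (li.idxOf (rest.getD (i+l) ' ') < i) := by
          intro hsm; have := (small_iff (i+l) hlr).mp hsm; omega
        have := hrest_pos _ hmem
        exact pv_mem_drop_of_idxOf_gt li _ (hrest_sub _ hmem) i (by omega)
      -- position transfer
      have eposL : ∀ c ∈ li.take i, li.idxOf c = (li.take i).idxOf c := by
        intro c hc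
        have := idxOf_segment li hnd 0 i (by omega) c (by simpa using hc)
        simpa using this
      have hdropfull : (li.drop (i+1)).take (li.length - (i+1)) = li.drop (i+1) := by
        rw [← List.length_drop]; exact List.take_length
      have eposR : ∀ c ∈ li.drop (i+1), li.idxOf c = (i+1) + (li.drop (i+1)).idxOf c := by
        intro c hc
        have := idxOf_segment li hnd (i+1) (li.length - (i+1)) (by omega) c (by rwa [hdropfull])
        rwa [hdropfull] at this
      -- permutations of the two sub-pairs
      have hrestnd : rest.Nodup := (List.nodup_cons.mp hlpnd).2
      have hpermL : (rest.take i).Perm (li.take i) := by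
        have hsub : rest.take i ⊆ li.take i := by
          intro c hc
          obtain ⟨l, hl, rfl⟩ := List.mem_iff_getElem.mp hc
          have := memL l hl
          rwa [List.getD_eq_getElem _ _ hl] at this
        have hnd1 : (rest.take i).Nodup := hrestnd.sublist (List.take_sublist ..)
        have hlen1 : (li.take i).length ≤ (rest.take i).length := by
          simp [List.length_take]; omega
        exact (List.subperm_of_subset hnd1 hsub).perm_of_length_le hlen1
      have hpermR : (rest.drop i).Perm (li.drop (i+1)) := by
        have hsub : rest.drop i ⊆ li.drop (i+1) := by
          intro c hc
          obtain ⟨l, hl, rfl⟩ := List.mem_iff_getElem.mp hc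
          have := memR l hl
          rwa [List.getD_eq_getElem _ _ hl] at this
        have hnd1 : (rest.drop i).Nodup := hrestnd.sublist (List.drop_sublist ..)
        have hlen1 : (li.drop (i+1)).length ≤ (rest.drop i).length := by
          simp [List.length_drop]; omega
        exact (List.subperm_of_subset hnd1 hsub).perm_of_length_le hlen1
      -- 231-avoidance of the two sub-pairs
      have h231L : pvNo231 (li.take i) (rest.take i) := by
        intro k hk j hj i' hi'
        have hj' : j < (rest.take i).length := by omega
        have hi'' : i' < (rest.take i).length := by omega
        have hkr : k < rest.length := by simp [List.length_take] at hk; omega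
        have hjr : j < rest.length := by omega
        have hir : i' < rest.length := by omega
        have h := h231 (k+1) (by simp; omega) (j+1) (by omega) (i'+1) (by omega)
        simp only [List.getD_cons_succ] at h
        have m1 := memL k hk; rw [egetDL k hk] at m1
        have m2 := memL j hj'; rw [egetDL j hj'] at m2
        have m3 := memL i' hi''; rw [egetDL i' hi''] at m3
        rw [egetDL k hk, egetDL j hj', egetDL i' hi'']
        rw [← eposL _ m1, ← eposL _ m2, ← eposL _ m3]
        exact h
      have h231R : pvNo231 (li.drop (i+1)) (rest.drop i) := by
        intro k hk j hj i' hi'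
        have hj' : j < (rest.drop i).length := by omega
        have hi'' : i' < (rest.drop i).length := by omega
        have hkr : i + k < rest.length := by simp [List.length_drop] at hk; omega
        have h := h231 (i+k+1) (by simp; omega) (i+j+1) (by omega) (i+i'+1) (by omega)
        simp only [List.getD_cons_succ] at h
        rw [egetDR k hk, egetDR j hj', egetDR i' hi'']
        have e1 := eposR _ (memR k hk)
        have e2 := eposR _ (memR j hj')
        have e3 := eposR _ (memR i' hi'')
        rw [egetDR k hk] at e1
        rw [egetDR j hj'] at e2
        rw [egetDR i' hi''] at e3
        intro hcon
        exact h ⟨by omega, by omega⟩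
      -- conclude via ih on both halves
      have hlenL : (rest.take i).length ≤ n := by
        simp only [List.length_cons] at hn; simp [List.length_take]; omega
      have hlenR : (rest.drop i).length ≤ n := by
        simp only [List.length_cons] at hn; simp [List.length_drop]; omega
      have hndL : (li.take i).Nodup := hnd.sublist (List.take_sublist ..)
      have hndR : (li.drop (i+1)).Nodup := hnd.sublist (List.drop_sublist ..)
      simp only [pvValidPairGo, if_pos hr, Bool.and_eq_true]
      exact ⟨ih (li.take i) (rest.take i) hlenL hndL hpermL h231L,
             ih (li.drop (i+1)) (rest.drop i) hlenR hndR hpermR h231R⟩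


-- MAIN: A's interval recursion computes B's slice recursion on every consistent segment pair
theorem pvDfsA_eq_slice (ino : List Char) (hnd : ino.Nodup) (pre : List Char) :
    ∀ (fuel k a b : Nat), k ≤ fuel → a + k ≤ ino.length → b + k ≤ pre.length →
      pvValidPair ((ino.drop a).take k) ((pre.drop b).take k) = true →
      pvDfsA (pvMkIdx ino) pre fuel (a : Int) ((a : Int) + (k : Int) - 1) (b : Int) ((b : Int) + (k : Int) - 1) =
        pvPostSlice ((ino.drop a).take k) ((pre.drop b).take k) := by
  intro fuel
  induction fuel with
  | zero =>
    intro k a b hk _ _ _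
    interval_cases k
    simp [pvDfsA, pvPostSlice]
  | succ n IH =>
    intro k a b hk ha hb hv
    rcases k with _ | m
    ·
      have : pvDfsA (pvMkIdx ino) pre (n+1) (a : Int) ((a : Int) + 0 - 1) (b : Int) ((b : Int) + 0 - 1) = [] := by
        unfold pvDfsA; rw [if_pos]; left; omega
      simp at this ⊢
      rw [this]
      simp [pvPostSlice]
    ·
      -- decompose the segments
      have haa : a < ino.length := by omega
      have hbb : b < pre.length := by omega
      have hinoD : ino.drop a = ino[a] :: ino.drop (a + 1) := (List.getElem_cons_drop haa).symm
      have hpreD : pre.drop b = pre[b] :: pre.drop (b + 1) := (List.getElem_cons_drop hbb).symm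
      set SI := (ino.drop a).take (m+1) with hSI
      set SP := (pre.drop b).take (m+1) with hSP
      have hSIc : SI = ino[a] :: (ino.drop (a+1)).take m := by rw [hSI, hinoD, List.take_succ_cons]
      have hSPc : SP = pre[b] :: (pre.drop (b+1)).take m := by rw [hSP, hpreD, List.take_succ_cons]
      set rest := (pre.drop (b+1)).take m with hrest
      have hSIlen : SI.length = m + 1 := by simp [hSI, List.length_take, List.length_drop]; omega
      -- decompose validity
      rw [hSPc] at hv
      rw [pvValidPair_cons] at hv
      by_cases hmem : pre[b] ∈ SI
      case neg => simp [hmem] at hv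
      rw [if_pos hmem] at hv
      simp only [Bool.and_eq_true] at hv
      set i := SI.idxOf pre[b] with hidef
      obtain ⟨hvl, hvr⟩ := hv
      have hi : i < m + 1 := hSIlen ▸ List.idxOf_lt_length_of_mem hmem
      have hmemino : pre[b] ∈ ino := List.mem_of_mem_drop (List.mem_of_mem_take (hSI ▸ hmem))
      have hglob : ino.idxOf pre[b] = a + i := by
        have := idxOf_segment ino hnd a (m+1) ha pre[b] (hSI ▸ hmem)
        rw [this]
      -- unfold A one step
      unfold pvDfsA
      rw [if_neg (by push_cast; omega)]
      have hroot : PySem.List.pyGetD pre (b : Int) ' ' = pre[b] := by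
        simp [List.getD, List.getElem?_eq_getElem hbb]
      have hIdx : (pvMkIdx ino).getD pre[b] 0 = (a : Int) + (i : Int) := by
        rw [pvMkIdx_getD ino pre[b] hnd hmemino, hglob]; push_cast; ring
      simp only [hroot, hIdx]
      -- IH with flexible Int arguments
      have IH' : ∀ (k' a' b' : Nat) (inL inR preL preR : Int), inL = (a' : Int) → inR = (a' : Int) + (k' : Int) - 1 →
          preL = (b' : Int) → preR = (b' : Int) + (k' : Int) - 1 → k' ≤ n → a' + k' ≤ ino.length → b' + k' ≤ pre.length →
          pvValidPair ((ino.drop a').take k') ((pre.drop b').take k') = true →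
          pvDfsA (pvMkIdx ino) pre n inL inR preL preR = pvPostSlice ((ino.drop a').take k') ((pre.drop b').take k') := by
        intro k' a' b' inL inR preL preR h1 h2 h3 h4 h5 h6 h7 h8
        subst h1; subst h2; subst h3; subst h4
        exact IH k' a' b' h5 h6 h7 h8
      -- the slice pieces, re-expressed as segments of ino / pre
      have e1 : List.take i SI = List.take i (List.drop a ino) := by
        rw [hSI, List.take_take, Nat.min_eq_left (by omega)]
      have e2 : List.take i rest = List.take i (List.drop (b+1) pre) := by
        rw [hrest, List.take_take, Nat.min_eq_left (by omega)]
      have e3 : List.drop (i+1) SI = List.take (m-i) (List.drop (a+i+1) ino) := by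
        rw [hSI, List.drop_take, List.drop_drop]
        rw [show a + (i+1) = a+i+1 from by omega, show m+1-(i+1) = m-i from by omega]
      have e4 : List.drop i rest = List.take (m-i) (List.drop (b+i+1) pre) := by
        rw [hrest, List.drop_take, List.drop_drop]
        rw [show b + 1 + i = b+i+1 from by omega]
      have hvl' : pvValidPair (List.take i (List.drop a ino)) (List.take i (List.drop (b+1) pre)) = true := by
        rwa [e1, e2] at hvl
      have hvr' : pvValidPair (List.take (m-i) (List.drop (a+i+1) ino)) (List.take (m-i) (List.drop (b+i+1) pre)) = true := by
        rwa [e3, e4] at hvr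
      have hL := IH' i a (b+1) ((a:Int)) ((a:Int) + (i:Int) - 1) ((b:Int) + 1) ((b:Int) + ((a:Int) + (i:Int) - (a:Int)))
        (by omega) (by omega) (by omega) (by omega) (by omega) (by omega) (by omega) hvl'
      have hR := IH' (m-i) (a+i+1) (b+i+1) ((a:Int) + (i:Int) + 1) ((a:Int) + ((m:Int) + 1) - 1)
        ((b:Int) + ((a:Int) + (i:Int) - (a:Int)) + 1) ((b:Int) + ((m:Int) + 1) - 1)
        (by omega) (by omega) (by omega) (by omega) (by omega) (by omega) (by omega) hvr'
      push_cast
      rw [hL, hR]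
      -- unfold B one step
      have hi' : (PySem.List.index? (ino[a] :: List.take m (List.drop (a+1) ino)) pre[b]).getD 0 = i := by
        rw [← hSIc]; rw [pvIndexGetD SI pre[b] hmem]
      conv_rhs => rw [hSIc, hSPc]
      rw [pvPostSlice]
      simp only [hi']
      rw [← hSIc, e1, e2, e3, e4]

-- top-level reduction of both ports to the segment lemma
theorem pv_top (inorder preorder : String)
    (hpre : Pre_find_postorder inorder preorder) :
    String.ofList (pvDfsA (pvMkIdx inorder.toList) preorder.toList (preorder.toList.length + 1) 0 ((inorder.toList.length : Int) - 1) 0 ((preorder.toList.length : Int) - 1)) =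
      String.ofList (pvPostSlice inorder.toList preorder.toList) := by
  rcases hpre with h | h | h
  · subst h
    simp only [String.toList_empty]
    have hA : pvDfsA (pvMkIdx []) preorder.toList (preorder.toList.length + 1) 0 ((List.length ([] : List Char) : Int) - 1) 0 ((preorder.toList.length : Int) - 1) = [] := by
      unfold pvDfsA; rw [if_pos]; left; simp
    have hB : pvPostSlice [] preorder.toList = [] := by simp [pvPostSlice]
    rw [hA, hB]
  · subst h
    simp only [String.toList_empty]
    have hA : pvDfsA (pvMkIdx inorder.toList) [] (List.length ([] : List Char) + 1) 0 ((inorder.toList.length : Int) - 1) 0 ((List.length ([] : List Char) : Int) - 1) = [] := by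
      unfold pvDfsA; rw [if_pos]; right; simp
    have hB : pvPostSlice inorder.toList [] = [] := by
      cases hli : inorder.toList <;> simp [pvPostSlice]
    rw [hA, hB]
  · obtain ⟨hnd, hperm, h231⟩ := h
    set li := inorder.toList
    set lp := preorder.toList
    have hval : pvValidPair li lp = true :=
      pv_pre231_valid lp.length li lp (Nat.le_refl _) hnd hperm h231
    have hlen := pvValidPair_length _ _ hval
    congr 1
    have hseg1 : (li.drop 0).take lp.length = li := by rw [List.drop_zero, ← hlen, List.take_length]
    have hseg2 : (lp.drop 0).take lp.length = lp := by rw [List.drop_zero, List.take_length]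
    have h := pvDfsA_eq_slice li hnd lp (lp.length+1) lp.length 0 0 (by omega) (by omega) (by omega)
      (by rw [hseg1, hseg2]; exact hval)
    rw [hseg1, hseg2] at h
    convert h using 2 <;> push_cast <;> omega

-- ===== VERDICT (by name: the statement is the Claim_ definition above) =====
theorem find_postorder_spec : Claim_equal_find_postorder := by
  intro inorder preorder _ hpre
  unfold Spec_find_postorder find_postorder find_postorder_alt
  exact pv_top inorder preorder hpre
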